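-- pv_equiv track=rewrite | github.com/YevhenMoroz/th2-script-quod-demo | test_framework/algo_formulas_manager.py | make_expire_date_next_sunday
-- ===== SOURCE A (Python) =====
-- def make_expire_date_next_sunday(day: int) -> int:
--     days = [0, 1, 2, 3, 4, 5, 6]
--     shift = 6
--     res_shift = 0
--     for i in days:
--         if day == i:
--             res_shift = shift
--         shift -= 1
--     return res_shift
-- ===== SOURCE B (Python) =====
-- def make_expire_date_next_sunday(day: int) -> int:
--     return 6 - day if 0 <= day <= 6 else 0
-- ===== Notes on version B (the rewrite author's own statement) =====
-- stated objective: simpler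
-- what changed: Replaces the 7-iteration scan with decrementing shift accumulator by the closed form 6 - day guarded by the inclusive range check 0 <= day <= 6.
import Mathlib
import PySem

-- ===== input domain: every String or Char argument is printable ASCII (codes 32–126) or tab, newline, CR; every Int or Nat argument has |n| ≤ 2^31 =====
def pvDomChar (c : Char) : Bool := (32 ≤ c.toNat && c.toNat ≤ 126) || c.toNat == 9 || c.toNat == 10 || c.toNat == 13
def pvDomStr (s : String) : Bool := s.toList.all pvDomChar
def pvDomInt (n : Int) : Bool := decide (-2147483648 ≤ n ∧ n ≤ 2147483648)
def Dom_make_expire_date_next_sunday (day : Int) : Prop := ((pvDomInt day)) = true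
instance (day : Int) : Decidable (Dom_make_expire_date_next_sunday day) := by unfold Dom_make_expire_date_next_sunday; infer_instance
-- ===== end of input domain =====

-- B replaces A's 7-element scan with the closed form 6 - day under an inclusive 0..6 range check (objective: simpler).

-- ===== PORT A =====
-- fold over days with state (shift, res_shift), exactly A's loop
def make_expire_date_next_sunday (day : Int) : Int :=
  let days : List Int := [0, 1, 2, 3, 4, 5, 6]
  let st := days.foldl
    (fun (st : Int × Int) i =>
      let res := if day = i then st.1 else st.2
      (st.1 - 1, res))
    (6, 0)
  st.2

-- ===== PORT B =====
def make_expire_date_next_sunday_alt (day : Int) : Int :=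
  if 0 ≤ day ∧ day ≤ 6 then 6 - day else 0

-- ===== PRECONDITION & SPEC =====
def Spec_make_expire_date_next_sunday (day : Int) (out : Int) : Prop := out = make_expire_date_next_sunday_alt day
instance (day : Int) (out : Int) : Decidable (Spec_make_expire_date_next_sunday day out) := by unfold Spec_make_expire_date_next_sunday; infer_instance

-- ===== CLAIM (what is proved, stated in full; the proofs are below) =====
def Claim_equal_make_expire_date_next_sunday : Prop := ∀ (day : Int), Dom_make_expire_date_next_sunday day → Spec_make_expire_date_next_sunday day (make_expire_date_next_sunday day)

-- ===== LEMMAS AND PROOFS =====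

-- ===== VERDICT (by name: the statement is the Claim_ definition above) =====
theorem make_expire_date_next_sunday_spec : Claim_equal_make_expire_date_next_sunday := by
  intro day _
  unfold Spec_make_expire_date_next_sunday make_expire_date_next_sunday make_expire_date_next_sunday_alt
  simp only [List.foldl]
  by_cases h0 : day = 0 <;> by_cases h1 : day = 1 <;> by_cases h2 : day = 2 <;>
    by_cases h3 : day = 3 <;> by_cases h4 : day = 4 <;> by_cases h5 : day = 5 <;>
    by_cases h6 : day = 6 <;> simp_all <;> omega
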